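-- pv_equiv track=rewrite | github.com/btrif/Python_dev_repo | Project EULER/pb266 Pseudo Square Root.py | makeprods
-- ===== SOURCE A (Python) =====
-- def makeprods(ps):
--     t=len(ps)
--     S=[]
--     for n in range(2**t):
--         p=1
--         for b in range(t):
--             if n&(1<<b):
--                 p*=ps[b]
--         S.append(p)
--     S.sort()
--     return S
-- ===== SOURCE B (Python) =====
-- def makeprods(ps):
--     # Incremental doubling: keep the sorted list of all subset products of the
--     # prefix processed so far; each new factor contributes a multiplied copy,
--     # re-sorted (reversed when the factor is negative) and merged in linearly.
--     S = [1]
--     for p in ps: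
--         T = [x * p for x in S]
--         if p < 0:
--             T.reverse()
--         i = 0
--         j = 0
--         R = []
--         while i < len(S) and j < len(T):
--             if S[i] <= T[j]:
--                 R.append(S[i])
--                 i += 1
--             else:
--                 R.append(T[j])
--                 j += 1
--         R.extend(S[i:])
--         R.extend(T[j:])
--         S = R
--     return S
-- ===== Notes on version B (the rewrite author's own statement) =====
-- stated objective: alternative
-- what changed: Replaces the enumerate-all-bitmasks-then-sort algorithm by incremental doubling: a sorted list of subset products of the processed prefix is maintained and the multiplied copy (reversed for a negative factor) is merged in linearly, removing both the per-subset O(t) bit loop and the final sort; intended as faster (measured 5.6x at n=16, but unconfirmed at the largest timing size where both exceed the limit).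
import Mathlib
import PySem

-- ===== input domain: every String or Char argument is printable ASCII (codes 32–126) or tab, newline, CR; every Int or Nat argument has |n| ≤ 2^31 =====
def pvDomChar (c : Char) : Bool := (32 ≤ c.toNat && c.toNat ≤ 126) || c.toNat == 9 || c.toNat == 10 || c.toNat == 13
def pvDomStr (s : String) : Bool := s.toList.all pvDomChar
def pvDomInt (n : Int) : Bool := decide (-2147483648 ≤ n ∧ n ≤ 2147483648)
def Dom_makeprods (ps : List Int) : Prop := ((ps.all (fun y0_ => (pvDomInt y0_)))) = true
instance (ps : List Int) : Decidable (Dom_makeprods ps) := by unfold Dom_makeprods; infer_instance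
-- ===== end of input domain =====

-- B replaces A's enumerate-all-bitmasks-then-sort by incremental doubling of the
-- subset-product list with a linear merge of the multiplied copy, so it stays sorted.


-- ===== PORT A =====
-- literal port of A: for n in range(2**t) build the product over the set bits of n,
-- append, then sort.  'n & (1 << b)' is ported as Int.land n (1 <<< b.toNat): b comes
-- from range(t) so b ≥ 0 and the shift amount b.toNat is exact; ps[b] with
-- 0 ≤ b < len ps is always in range, so pyGetD is exact there.
def makeprods (ps : List Int) : List Int :=
  let t := ps.length
  let S : List Int :=
    (PySem.List.pyRange 0 ((2 : Int) ^ t) 1).foldl (fun S n =>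
      let p : Int :=
        (PySem.List.pyRange 0 (t : Int) 1).foldl (fun p b =>
          if Int.land n ((1 : Int) <<< b.toNat) ≠ 0 then p * PySem.List.pyGetD ps b 0
          else p) 1
      S ++ [p]) []
  PySem.List.sorted S (fun x => x) false

-- ===== PORT B =====
-- B-side helper: the two-pointer merge loop of Source B as its structural recursion
def mergeInts : List Int → List Int → List Int
  | [], ys => ys
  | x :: xs, [] => x :: xs
  | x :: xs, y :: ys =>
      if x ≤ y then x :: mergeInts xs (y :: ys) else y :: mergeInts (x :: xs) ys

def makeprods_alt (ps : List Int) : List Int :=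
  ps.foldl (fun S p =>
    let T := S.map (fun x => x * p)
    let T := if p < 0 then T.reverse else T
    mergeInts S T) [1]

-- ===== PRECONDITION & SPEC =====
def Spec_makeprods (ps : List Int) (out : List Int) : Prop := out = makeprods_alt ps
instance (ps : List Int) (out : List Int) : Decidable (Spec_makeprods ps out) := by unfold Spec_makeprods; infer_instance

-- ===== CLAIM (what is proved, stated in full; the proofs are below) =====
def Claim_equal_makeprods : Prop := ∀ (ps : List Int), Dom_makeprods ps → Spec_makeprods ps (makeprods ps)

-- ===== LEMMAS AND PROOFS =====

-- canonical doubling list of all subset products (proof-only)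
def subProds (ps : List Int) : List Int :=
  ps.foldl (fun acc p => acc ++ acc.map (fun x => x * p)) [1]

-- A's inner bit-product, Nat-indexed
def gbit (ps : List Int) (n : Nat) : Int :=
  (List.range ps.length).foldl
    (fun p b => if n.testBit b then p * ps.getD b 0 else p) 1

theorem cond_iff (k j : Nat) :
    (Int.land (↑k) ((1:Int) <<< (j : Int)) ≠ 0) ↔ k.testBit j := by
  have hs : ((1:Int) <<< (j : Int)) = ((Nat.shiftLeft' false 1 j : Nat) : Int) := rfl
  have h1 : Int.land (↑k) ((Nat.shiftLeft' false 1 j : Nat) : Int)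
      = ((Nat.land k (Nat.shiftLeft' false 1 j) : Nat) : Int) := rfl
  rw [hs, h1, Nat.shiftLeft'_false, Nat.one_shiftLeft]
  have h2 : Nat.land k (2 ^ j) = k &&& 2 ^ j := rfl
  rw [h2, Nat.and_two_pow]
  cases h : k.testBit j <;> simp [h]

theorem inner_eq (ps : List Int) (k : Nat) :
    (PySem.List.pyRange 0 (ps.length : Int) 1).foldl
      (fun p b => if Int.land (↑k) ((1:Int) <<< b.toNat) ≠ 0
                  then p * PySem.List.pyGetD ps b 0 else p) 1
    = gbit ps k := by
  rw [PySem.List.pyRange_one, List.foldl_map]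
  unfold gbit
  have : ((ps.length : Int) - 0).toNat = ps.length := by omega
  rw [this]
  apply PySem.List.foldl_congr_mem
  intro p j _
  simp only [zero_add, Int.toNat_natCast, PySem.List.pyGetD_natCast]
  by_cases h : k.testBit j
  · rw [if_pos ((cond_iff k j).mpr h), if_pos h]
  · rw [if_neg (fun hc => h ((cond_iff k j).mp hc)), if_neg h]

theorem gbit_append_lo (ps : List Int) (q : Int) (n : Nat) (hn : n < 2 ^ ps.length) :
    gbit (ps ++ [q]) n = gbit ps n := by
  unfold gbit
  rw [List.length_append, List.length_singleton, List.range_succ, List.foldl_append]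
  have hbit : n.testBit ps.length = false := Nat.testBit_lt_two_pow hn
  simp only [List.foldl_cons, List.foldl_nil, hbit, if_neg Bool.false_ne_true]
  apply PySem.List.foldl_congr_mem
  intro p b hb
  rw [List.mem_range] at hb
  rw [List.getD_append _ _ _ _ hb]

theorem gbit_append_hi (ps : List Int) (q : Int) (n : Nat) (hn : n < 2 ^ ps.length) :
    gbit (ps ++ [q]) (2 ^ ps.length + n) = gbit ps n * q := by
  unfold gbit
  rw [List.length_append, List.length_singleton, List.range_succ, List.foldl_append]
  have hb0 : n.testBit ps.length = false := Nat.testBit_lt_two_pow hn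
  have hbit : (2 ^ ps.length + n).testBit ps.length = true := by
    rw [Nat.testBit_two_pow_add_eq, hb0]; rfl
  have hq : (ps ++ [q]).getD ps.length 0 = q := by
    simp [List.getD]
  simp only [List.foldl_cons, List.foldl_nil, hbit, if_pos, hq]
  congr 1
  apply PySem.List.foldl_congr_mem
  intro p b hb
  rw [List.mem_range] at hb
  rw [List.getD_append _ _ _ _ hb, Nat.testBit_two_pow_add_gt hb]

theorem map_gbit_range (ps : List Int) :
    (List.range (2 ^ ps.length)).map (gbit ps) = subProds ps := by
  induction ps using List.reverseRecOn with
  | nil => decide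
  | append_singleton ps q ih =>
      have hsub : subProds (ps ++ [q])
          = subProds ps ++ (subProds ps).map (fun x => x * q) := by
        unfold subProds
        rw [List.foldl_concat]
      rw [hsub, ← ih]
      rw [List.length_append, List.length_singleton, pow_succ, mul_two, List.range_add]
      rw [List.map_append, List.map_map]
      congr 1
      · apply List.map_congr_left
        intro n hn
        rw [List.mem_range] at hn
        exact gbit_append_lo ps q n hn
      · rw [List.map_map]
        apply List.map_congr_left
        intro n hn
        rw [List.mem_range] at hn
        exact gbit_append_hi ps q n hn

-- A's result: the sort of the canonical doubling list
theorem makeprods_eq_sorted_subProds (ps : List Int) :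
    makeprods ps = PySem.List.sorted (subProds ps) (fun x => x) false := by
  show PySem.List.sorted _ (fun x => x) false = _
  congr 1
  rw [PySem.List.foldl_append_singleton_eq_map, List.nil_append]
  rw [PySem.List.pyRange_one 0 ((2:Int) ^ ps.length), List.map_map]
  have hpow : (((2:Int) ^ ps.length) - 0).toNat = 2 ^ ps.length := by
    rw [Int.sub_zero]
    norm_cast
  rw [hpow, ← map_gbit_range]
  apply List.map_congr_left
  intro k hk
  simp only [Function.comp, zero_add]
  exact inner_eq ps k

theorem mergeInts_perm (xs ys : List Int) : (mergeInts xs ys).Perm (xs ++ ys) := by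
  induction xs, ys using mergeInts.induct with
  | case1 ys => simp [mergeInts]
  | case2 x xs => simp [mergeInts]
  | case3 x xs y ys h ih =>
      simpa [mergeInts, h] using ih.cons x
  | case4 x xs y ys h ih =>
      simp only [mergeInts, if_neg h]
      exact (ih.cons y).trans (List.Perm.symm (List.perm_middle))

theorem mem_mergeInts {a : Int} {xs ys : List Int} (h : a ∈ mergeInts xs ys) :
    a ∈ xs ∨ a ∈ ys := by
  have := (mergeInts_perm xs ys).mem_iff.mp h
  simpa using this

theorem mergeInts_pairwise (xs ys : List Int)
    (hx : xs.Pairwise (· ≤ ·)) (hy : ys.Pairwise (· ≤ ·)) :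
    (mergeInts xs ys).Pairwise (· ≤ ·) := by
  induction xs, ys using mergeInts.induct with
  | case1 ys => simpa [mergeInts] using hy
  | case2 x xs => simpa [mergeInts] using hx
  | case3 x xs y ys h ih =>
      rw [List.pairwise_cons] at hx
      simp only [mergeInts, if_pos h]
      refine List.pairwise_cons.mpr ⟨?_, ih hx.2 hy⟩
      intro a ha
      rcases mem_mergeInts ha with h1 | h1
      · exact hx.1 a h1
      · rcases List.mem_cons.mp h1 with rfl | h2
        · exact h
        · rw [List.pairwise_cons] at hy
          exact le_trans h (hy.1 a h2)
  | case4 x xs y ys h ih =>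
      rw [List.pairwise_cons] at hy
      simp only [mergeInts, if_neg h]
      refine List.pairwise_cons.mpr ⟨?_, ih hx hy.2⟩
      intro a ha
      have hyx : y ≤ x := le_of_lt (lt_of_not_ge h)
      rcases mem_mergeInts ha with h1 | h1
      · rcases List.mem_cons.mp h1 with rfl | h2
        · exact hyx
        · rw [List.pairwise_cons] at hx
          exact le_trans hyx (hx.1 a h2)
      · exact hy.1 a h1

theorem step_perm_pairwise (S A : List Int) (p : Int)
    (hperm : S.Perm A) (hpw : S.Pairwise (· ≤ ·)) :
    (mergeInts S (if p < 0 then (S.map (fun x => x * p)).reverse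
                  else S.map (fun x => x * p))).Perm
        (A ++ A.map (fun x => x * p)) ∧
    (mergeInts S (if p < 0 then (S.map (fun x => x * p)).reverse
                  else S.map (fun x => x * p))).Pairwise (· ≤ ·) := by
  set T := if p < 0 then (S.map (fun x => x * p)).reverse else S.map (fun x => x * p)
    with hT
  have hTperm : T.Perm (A.map (fun x => x * p)) := by
    rw [hT]; split
    · exact (List.reverse_perm _).trans (hperm.map _)
    · exact hperm.map _
  have hTpw : T.Pairwise (· ≤ ·) := by
    rw [hT]; split
    · rw [List.pairwise_reverse, List.pairwise_map]
      exact hpw.imp (fun hab => mul_le_mul_of_nonpos_right hab (by omega))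
    · rw [List.pairwise_map]
      exact hpw.imp (fun hab => mul_le_mul_of_nonneg_right hab (by omega))
  constructor
  · exact (mergeInts_perm S T).trans (hperm.append hTperm)
  · exact mergeInts_pairwise S T hpw hTpw

theorem fold_inv (ps : List Int) (S A : List Int)
    (hperm : S.Perm A) (hpw : S.Pairwise (· ≤ ·)) :
    (ps.foldl (fun S p =>
        let T := S.map (fun x => x * p)
        let T := if p < 0 then T.reverse else T
        mergeInts S T) S).Perm
      (ps.foldl (fun acc p => acc ++ acc.map (fun x => x * p)) A) ∧
    (ps.foldl (fun S p =>
        let T := S.map (fun x => x * p)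
        let T := if p < 0 then T.reverse else T
        mergeInts S T) S).Pairwise (· ≤ ·) := by
  induction ps generalizing S A with
  | nil => exact ⟨hperm, hpw⟩
  | cons p ps ih =>
      simp only [List.foldl_cons]
      obtain ⟨h1, h2⟩ := step_perm_pairwise S A p hperm hpw
      exact ih _ _ h1 h2

theorem alt_perm_sorted (ps : List Int) :
    (makeprods_alt ps).Perm (subProds ps) ∧ (makeprods_alt ps).Pairwise (· ≤ ·) :=
  fold_inv ps [1] [1] (List.Perm.refl _) (by simp)

-- ===== VERDICT (by name: the statement is the Claim_ definition above) =====
theorem makeprods_spec : Claim_equal_makeprods := by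
  intro ps _
  unfold Spec_makeprods
  obtain ⟨hperm, hpw⟩ := alt_perm_sorted ps
  rw [makeprods_eq_sorted_subProds]
  exact PySem.List.sorted_id_eq_of_perm_of_pairwise (subProds ps) _ hperm hpw
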